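-- pv_equiv track=rewrite | github.com/EliottNys/IA_Abalone | IA.py | computeAlignementSort
-- ===== SOURCE A (Python) =====
-- directions = {
-- 	'NE': (-1,  0),
-- 	'SW': ( 1,  0),
-- 	'NW': (-1, -1),
-- 	'SE': ( 1,  1),
-- 	 'E': ( 0,  1),
-- 	 'W': ( 0, -1)
-- }
--
-- def getDirectionName(directionTuple):	#transforme un tuple en direction
-- 	for dirName in directions:
-- 		if directionTuple == directions[dirName]:
-- 			return dirName
--
-- def computeAlignementSort(marbles):		#renvoie la direction d'une ligne
-- 	marbles = sorted(marbles, key=lambda L: L[0]*9+L[1])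
-- 	D = set()
-- 	for i in range(len(marbles)-1):
-- 		direction = (marbles[i+1][0]-marbles[i][0], marbles[i+1][1]-marbles[i][1])
-- 		if direction not in directions.values():
-- 			return None
-- 		D.add(direction)
-- 	return getDirectionName(D.pop()) if len(D) == 1 else None
-- ===== SOURCE B (Python) =====
-- directions = {
-- 	'NE': (-1,  0),
-- 	'SW': ( 1,  0),
-- 	'NW': (-1, -1),
-- 	'SE': ( 1,  1),
-- 	 'E': ( 0,  1),
-- 	 'W': ( 0, -1)
-- }
--
-- def computeAlignementSort(marbles):
-- 	# No sort: find the two endpoints (min/max by the board key) in one O(n) pass,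
-- 	# derive the unit step by exact division of the endpoint difference, and verify
-- 	# the line by hash-set membership of every expected point.
-- 	n = len(marbles)
-- 	if n < 2:
-- 		return None
-- 	S = set(marbles)
-- 	m = M = marbles[0]
-- 	for p in marbles[1:]:
-- 		k = p[0]*9 + p[1]
-- 		if k < m[0]*9 + m[1]:
-- 			m = p
-- 		if k > M[0]*9 + M[1]:
-- 			M = p
-- 	dx, dy = M[0] - m[0], M[1] - m[1]
-- 	if dx % (n-1) or dy % (n-1):
-- 		return None
-- 	d = (dx // (n-1), dy // (n-1))
-- 	name = next((nm for nm, v in directions.items() if v == d), None)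
-- 	if name is None:
-- 		return None
-- 	if all((m[0] + i*d[0], m[1] + i*d[1]) in S for i in range(n)):
-- 		return name
-- 	return None
-- ===== Notes on version B (the rewrite author's own statement) =====
-- stated objective: alternative
-- what changed: B removes A's sort + consecutive-difference set: it finds the two line endpoints in one min/max pass over the unsorted marbles, recovers the unit step by exact division of the endpoint difference by n-1, and verifies the line by hash-set membership of each expected point.
import Mathlib
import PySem

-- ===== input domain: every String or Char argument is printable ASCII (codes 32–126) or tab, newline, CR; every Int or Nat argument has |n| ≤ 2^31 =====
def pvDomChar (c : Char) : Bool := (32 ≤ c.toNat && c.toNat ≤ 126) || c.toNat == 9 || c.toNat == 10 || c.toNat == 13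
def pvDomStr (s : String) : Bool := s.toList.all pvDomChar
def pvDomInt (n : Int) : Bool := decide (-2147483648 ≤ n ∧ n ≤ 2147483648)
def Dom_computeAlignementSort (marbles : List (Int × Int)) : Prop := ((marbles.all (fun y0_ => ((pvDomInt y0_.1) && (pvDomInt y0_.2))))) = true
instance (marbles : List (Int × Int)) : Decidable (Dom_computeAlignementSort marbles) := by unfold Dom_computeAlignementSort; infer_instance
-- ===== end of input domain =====

-- B drops A's sort entirely: one pass finds the two endpoints (min/max by the board key),
-- the unit step is recovered by exact division, and the line is verified by set-membership
-- of every expected point (objective: alternative algorithm, no sort).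

-- ===== PORT A =====
-- the module-level dict `directions` (insertion order)
def dirList : List (String × (Int × Int)) :=
  [("NE", (-1, 0)), ("SW", (1, 0)), ("NW", (-1, -1)), ("SE", (1, 1)), ("E", (0, 1)), ("W", (0, -1))]

-- for dirName in directions: if directionTuple == directions[dirName]: return dirName  (implicit None)
def getDirectionName (directionTuple : Int × Int) : Option String :=
  (dirList.find? (fun p => p.2 == directionTuple)).map (fun p => p.1)

-- A's loop `for i in range(len(marbles)-1)` reading marbles[i], marbles[i+1]: the obvious
-- structural recursion over adjacent elements, carrying the same set state D; `none` = early `return None`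
def aLoop (D : PySem.Set (Int × Int)) : List (Int × Int) → Option (PySem.Set (Int × Int))
  | a :: b :: rest =>
      let direction : Int × Int := (b.1 - a.1, b.2 - a.2)
      if dirList.any (fun p => p.2 == direction) then aLoop (PySem.Set.add D direction) (b :: rest)
      else none
  | _ => some D

def computeAlignementSort (marbles : List (Int × Int)) : Option String :=
  match aLoop PySem.Set.empty (PySem.List.sorted marbles (fun L => L.1 * 9 + L.2) false) with
  | none => none
  | some D =>
      -- D.pop() on the singleton set is its unique element (order-independent), headI here
      if PySem.Set.len D == 1 then getDirectionName D.headI else none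

-- ===== PORT B =====
-- Source B's loop body: update the running key-min and key-max with the next marble
def bMin (m p : Int × Int) : Int × Int := if p.1 * 9 + p.2 < m.1 * 9 + m.2 then p else m
def bMax (M p : Int × Int) : Int × Int := if p.1 * 9 + p.2 > M.1 * 9 + M.2 then p else M
def bUpd (mM : (Int × Int) × (Int × Int)) (p : Int × Int) : (Int × Int) × (Int × Int) :=
  (bMin mM.1 p, bMax mM.2 p)

-- Source B's divisibility guard (`if dx % (n-1) or dy % (n-1): return None`) + unit-step division
def bStep (m M : Int × Int) (N : Int) : Option (Int × Int) :=
  if PySem.Int.mod (M.1 - m.1) N ≠ 0 ∨ PySem.Int.mod (M.2 - m.2) N ≠ 0 then none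
  else some (PySem.Int.floordiv (M.1 - m.1) N, PySem.Int.floordiv (M.2 - m.2) N)

-- Source B after the min/max loop: step, direction-name lookup, set-membership verification
def bRest (marbles : List (Int × Int)) (m M : Int × Int) : Option String :=
  match bStep m M ((marbles.length : Int) - 1) with
  | none => none
  | some d =>
    match (dirList.find? (fun p => p.2 == d)).map (fun p => p.1) with
    | none => none
    | some nm =>
      if (PySem.List.pyRange 0 (marbles.length : Int) 1).all
          (fun i => PySem.Set.contains (PySem.Set.ofList marbles) (m.1 + i * d.1, m.2 + i * d.2))
      then some nm else none

def computeAlignementSort_alt (marbles : List (Int × Int)) : Option String :=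
  if (marbles.length : Int) < 2 then none else
  match marbles with
  | [] => none
  | h :: t =>
    let mM := t.foldl bUpd (h, h)
    bRest marbles mM.1 mM.2

-- ===== PRECONDITION & SPEC =====
def Spec_computeAlignementSort (marbles : List (Int × Int)) (out : Option String) : Prop := out = computeAlignementSort_alt marbles
instance (marbles : List (Int × Int)) (out : Option String) : Decidable (Spec_computeAlignementSort marbles out) := by unfold Spec_computeAlignementSort; infer_instance

-- ===== CLAIM (what is proved, stated in full; the proofs are below) =====
def Claim_equal_computeAlignementSort : Prop := ∀ (marbles : List (Int × Int)), Dom_computeAlignementSort marbles → Spec_computeAlignementSort marbles (computeAlignementSort marbles)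

-- ===== LEMMAS AND PROOFS =====

-- consecutive differences of a list
def diffs (l : List (Int × Int)) : List (Int × Int) :=
  List.zipWith (fun a b => (b.1 - a.1, b.2 - a.2)) l l.tail

-- the arithmetic progression m, m+d, …, m+(n-1)d
def prog (m d : Int × Int) (n : Nat) : List (Int × Int) :=
  (List.range n).map (fun i : Nat => (m.1 + (i : Int) * d.1, m.2 + (i : Int) * d.2))

-- "marbles sorted by the board key is the progression from m with unit step d ∈ directions"
def GoodLine (marbles : List (Int × Int)) (m d : Int × Int) : Prop :=
  2 ≤ marbles.length ∧ dirList.any (fun p => p.2 == d) = true ∧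
  PySem.List.sorted marbles (fun L => L.1 * 9 + L.2) false = prog m d marbles.length

lemma diffs_cons_cons (a b : Int × Int) (t : List (Int × Int)) :
    diffs (a :: b :: t) = (b.1 - a.1, b.2 - a.2) :: diffs (b :: t) := by
  simp [diffs]

lemma aLoop_char : ∀ (l : List (Int × Int)) (D : PySem.Set (Int × Int)),
    aLoop D l =
      if (diffs l).all (fun x => dirList.any (fun p => p.2 == x))
      then some ((diffs l).foldl PySem.Set.add D) else none := by
  intro l
  induction l with
  | nil => intro D; simp [aLoop, diffs]
  | cons a t ih =>
    intro D
    cases t with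
    | nil => simp [aLoop, diffs]
    | cons b rest =>
      rw [diffs_cons_cons]
      simp only [aLoop, ih, List.all_cons, List.foldl_cons, Bool.and_eq_true]
      split_ifs <;> simp_all

lemma mem_foldl_add (l : List (Int × Int)) (S : PySem.Set (Int × Int)) (y : Int × Int) :
    y ∈ l.foldl PySem.Set.add S ↔ y ∈ S ∨ y ∈ l := by
  induction l generalizing S with
  | nil => simp
  | cons x t ih =>
    simp only [List.foldl_cons, ih, PySem.Set.mem_add, List.mem_cons]
    tauto

lemma foldl_add_const (d : Int × Int) : ∀ (l : List (Int × Int)), (∀ x ∈ l, x = d) →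
    l.foldl PySem.Set.add [d] = [d] := by
  intro l
  induction l with
  | nil => intro _; rfl
  | cons x t ih =>
    intro h
    have hx : x = d := h x (List.mem_cons_self)
    have hadd : PySem.Set.add [d] d = [d] := by simp [PySem.Set.add, PySem.Set.contains]
    simp only [List.foldl_cons, hx, hadd]
    exact ih (fun y hy => h y (List.mem_cons_of_mem _ hy))

lemma dir_key_ne : ∀ kv ∈ dirList, kv.2.1 * 9 + kv.2.2 ≠ 0 := by decide

lemma prog_succ (m d : Int × Int) (n : Nat) :
    prog m d (n + 1) = m :: prog (m.1 + d.1, m.2 + d.2) d n := by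
  unfold prog
  rw [List.range_succ_eq_map, List.map_cons, List.map_map, List.cons_eq_cons]
  constructor
  · exact Prod.ext_iff.mpr ⟨by simp, by simp⟩
  · apply List.map_congr_left
    intro i _
    simp only [Function.comp_apply]
    refine Prod.ext_iff.mpr ⟨?_, ?_⟩ <;> push_cast <;> ring

lemma length_prog (m d : Int × Int) (n : Nat) : (prog m d n).length = n := by
  simp [prog]

lemma mem_prog (m d x : Int × Int) (n : Nat) :
    x ∈ prog m d n ↔ ∃ i : Nat, i < n ∧ x = (m.1 + (i : Int) * d.1, m.2 + (i : Int) * d.2) := by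
  unfold prog
  rw [List.mem_map]
  constructor
  · rintro ⟨i, hi, rfl⟩; exact ⟨i, List.mem_range.mp hi, rfl⟩
  · rintro ⟨i, hi, rfl⟩; exact ⟨i, List.mem_range.mpr hi, rfl⟩

lemma prog_pairwise (m d : Int × Int) (n : Nat) (hd : 0 < d.1 * 9 + d.2) :
    (prog m d n).Pairwise (fun a b => a.1 * 9 + a.2 < b.1 * 9 + b.2) := by
  unfold prog
  refine List.Pairwise.map _ ?_ List.pairwise_lt_range
  intro i j hij
  have h1 : (i : Int) < (j : Int) := by exact_mod_cast hij
  dsimp only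
  nlinarith [mul_pos (sub_pos.mpr h1) hd]

lemma prog_nodup (m d : Int × Int) (n : Nat) (hd : 0 < d.1 * 9 + d.2) :
    (prog m d n).Nodup := by
  refine (prog_pairwise m d n hd).imp ?_
  intro a b h he
  rw [he] at h
  omega

-- the consecutive differences of a list are all d  ↔  the list is the progression from its head
lemma eq_prog_iff (d : Int × Int) :
    ∀ (rest : List (Int × Int)) (c : Int × Int),
      (∀ x ∈ diffs (c :: rest), x = d) ↔ c :: rest = prog c d (c :: rest).length := by
  intro rest
  induction rest with
  | nil =>
    intro c
    simp [diffs, prog, Prod.ext_iff]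
  | cons b rr ih =>
    intro c
    rw [diffs_cons_cons]
    have hl : (c :: b :: rr).length = (rr.length + 1) + 1 := by simp
    rw [hl, prog_succ]
    constructor
    · intro h
      have hb : (b.1 - c.1, b.2 - c.2) = d := h _ (by simp)
      have h2 : b :: rr = prog b d (b :: rr).length :=
        (ih b).mp (fun x hx => h x (List.mem_cons_of_mem _ hx))
      have hcd : (c.1 + d.1, c.2 + d.2) = b := by
        have h1 := congrArg Prod.fst hb
        have h2' := congrArg Prod.snd hb
        simp only [] at h1 h2'
        refine Prod.ext_iff.mpr ⟨?_, ?_⟩ <;> simp <;> omega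
      rw [List.cons_eq_cons]
      refine ⟨rfl, ?_⟩
      rw [hcd]
      simpa using h2
    · intro h
      rw [List.cons_eq_cons] at h
      obtain ⟨-, h⟩ := h
      rw [prog_succ, List.cons_eq_cons] at h
      obtain ⟨hb, hrr⟩ := h
      subst hb
      have h2 : ((c.1 + d.1, c.2 + d.2) : Int × Int) :: rr
          = prog (c.1 + d.1, c.2 + d.2) d (((c.1 + d.1, c.2 + d.2) : Int × Int) :: rr).length := by
        have hll : (((c.1 + d.1, c.2 + d.2) : Int × Int) :: rr).length = rr.length + 1 := by simp
        rw [hll, prog_succ, List.cons_eq_cons]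
        exact ⟨rfl, hrr⟩
      have hAPd := (ih _).mpr h2
      intro x hx
      rcases List.mem_cons.mp hx with hx | hx
      · rw [hx]
        refine Prod.ext_iff.mpr ⟨?_, ?_⟩ <;> simp
      · exact hAPd x hx

lemma good_key_pos (marbles : List (Int × Int)) (m d : Int × Int)
    (hg : GoodLine marbles m d) : 0 < d.1 * 9 + d.2 := by
  obtain ⟨h2, hdir, hsp⟩ := hg
  obtain ⟨kv, hkv, he⟩ := List.any_eq_true.mp hdir
  have hne : d.1 * 9 + d.2 ≠ 0 := by
    have h := dir_key_ne kv hkv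
    have hkd : kv.2 = d := by simpa using he
    rw [hkd] at h
    exact h
  have hpw := PySem.List.sorted_pairwise marbles (fun L => L.1 * 9 + L.2)
  rw [hsp] at hpw
  obtain ⟨k, hk⟩ : ∃ k, marbles.length = k + 2 := ⟨marbles.length - 2, by omega⟩
  rw [hk] at hpw
  rw [show k + 2 = (k + 1) + 1 from rfl, prog_succ, prog_succ] at hpw
  have hle := List.rel_of_pairwise_cons hpw (List.mem_cons_self)
  simp only [] at hle
  omega

lemma foldl_bUpd_fst : ∀ (t : List (Int × Int)) (mM : (Int × Int) × (Int × Int)),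
    (t.foldl bUpd mM).1 = t.foldl bMin mM.1 := by
  intro t
  induction t with
  | nil => intro mM; rfl
  | cons p t ih => intro mM; simp only [List.foldl_cons]; rw [ih]; rfl

lemma foldl_bUpd_snd : ∀ (t : List (Int × Int)) (mM : (Int × Int) × (Int × Int)),
    (t.foldl bUpd mM).2 = t.foldl bMax mM.2 := by
  intro t
  induction t with
  | nil => intro mM; rfl
  | cons p t ih => intro mM; simp only [List.foldl_cons]; rw [ih]; rfl

lemma foldl_bMin_spec : ∀ (t : List (Int × Int)) (m : Int × Int),
    t.foldl bMin m ∈ m :: t ∧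
    ∀ p ∈ m :: t, (t.foldl bMin m).1 * 9 + (t.foldl bMin m).2 ≤ p.1 * 9 + p.2 := by
  intro t
  induction t with
  | nil =>
    intro m
    constructor
    · simp
    · intro p hp
      rw [List.mem_singleton] at hp
      rw [hp]
      exact le_refl _
  | cons q t ih =>
    intro m
    simp only [List.foldl_cons]
    obtain ⟨ihm, ihle⟩ := ih (bMin m q)
    have hmem : bMin m q ∈ [m, q] := by unfold bMin; split_ifs <;> simp
    have hkey : (bMin m q).1 * 9 + (bMin m q).2 ≤ m.1 * 9 + m.2 ∧
        (bMin m q).1 * 9 + (bMin m q).2 ≤ q.1 * 9 + q.2 := by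
      unfold bMin; split_ifs with h <;> constructor <;> omega
    have hr := ihle (bMin m q) List.mem_cons_self
    constructor
    · rcases List.mem_cons.mp ihm with h | h
      · rcases List.mem_cons.mp hmem with h' | h' <;> simp_all
      · simp [h]
    · intro p hp
      rcases List.mem_cons.mp hp with h | h
      · rw [h]; exact hr.trans hkey.1
      rcases List.mem_cons.mp h with h' | h'
      · rw [h']; exact hr.trans hkey.2
      · exact ihle p (List.mem_cons_of_mem _ h')

lemma foldl_bMax_spec : ∀ (t : List (Int × Int)) (M : Int × Int),
    t.foldl bMax M ∈ M :: t ∧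
    ∀ p ∈ M :: t, p.1 * 9 + p.2 ≤ (t.foldl bMax M).1 * 9 + (t.foldl bMax M).2 := by
  intro t
  induction t with
  | nil =>
    intro M
    constructor
    · simp
    · intro p hp
      rw [List.mem_singleton] at hp
      rw [hp]
      exact le_refl _
  | cons q t ih =>
    intro M
    simp only [List.foldl_cons]
    obtain ⟨ihm, ihle⟩ := ih (bMax M q)
    have hmem : bMax M q ∈ [M, q] := by unfold bMax; split_ifs <;> simp
    have hkey : M.1 * 9 + M.2 ≤ (bMax M q).1 * 9 + (bMax M q).2 ∧
        q.1 * 9 + q.2 ≤ (bMax M q).1 * 9 + (bMax M q).2 := by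
      unfold bMax; split_ifs with h <;> constructor <;> omega
    have hr := ihle (bMax M q) List.mem_cons_self
    constructor
    · rcases List.mem_cons.mp ihm with h | h
      · rcases List.mem_cons.mp hmem with h' | h' <;> simp_all
      · simp [h]
    · intro p hp
      rcases List.mem_cons.mp hp with h | h
      · rw [h]; exact hkey.1.trans hr
      rcases List.mem_cons.mp h with h' | h'
      · rw [h']; exact hkey.2.trans hr
      · exact ihle p (List.mem_cons_of_mem _ h')

lemma A_some_iff (marbles : List (Int × Int)) (nm : String) :
    computeAlignementSort marbles = some nm ↔
      ∃ m d, GoodLine marbles m d ∧ getDirectionName d = some nm := by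
  unfold computeAlignementSort
  simp only [GoodLine]
  have hperm : (PySem.List.sorted marbles (fun L => L.1 * 9 + L.2) false).Perm marbles :=
    PySem.List.sorted_perm _ _ _
  generalize hs : PySem.List.sorted marbles (fun L => L.1 * 9 + L.2) false = s at hperm ⊢
  have hlen : s.length = marbles.length := hperm.length_eq
  rcases s with _ | ⟨p0, _ | ⟨p1, rest⟩⟩
  · constructor
    · intro h
      simp [aLoop, PySem.Set.len, PySem.Set.empty] at h
    · rintro ⟨m, d, ⟨h2, -, -⟩, -⟩
      simp at hlen
      omega
  · constructor
    · intro h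
      simp [aLoop, PySem.Set.len, PySem.Set.empty] at h
    · rintro ⟨m, d, ⟨h2, -, -⟩, -⟩
      simp at hlen
      omega
  · rw [aLoop_char]
    by_cases hall : ((diffs (p0 :: p1 :: rest)).all (fun x => dirList.any (fun p => p.2 == x))) = true
    · rw [if_pos hall]
      simp only []
      by_cases hAP : ∀ x ∈ diffs (p0 :: p1 :: rest), x = (p1.1 - p0.1, p1.2 - p0.2)
      · have hD : (diffs (p0 :: p1 :: rest)).foldl PySem.Set.add PySem.Set.empty
            = [(p1.1 - p0.1, p1.2 - p0.2)] := by
          rw [diffs_cons_cons, List.foldl_cons]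
          have h1 : PySem.Set.add PySem.Set.empty (p1.1 - p0.1, p1.2 - p0.2)
              = [(p1.1 - p0.1, p1.2 - p0.2)] := rfl
          rw [h1]
          exact foldl_add_const _ _
            (fun x hx => hAP x (by rw [diffs_cons_cons]; exact List.mem_cons_of_mem _ hx))
        rw [hD]
        have hd0 : dirList.any (fun p => p.2 == (p1.1 - p0.1, p1.2 - p0.2)) = true :=
          List.all_eq_true.mp hall (p1.1 - p0.1, p1.2 - p0.2)
            (by rw [diffs_cons_cons]; exact List.mem_cons_self)
        have hprog : p0 :: p1 :: rest = prog p0 (p1.1 - p0.1, p1.2 - p0.2) (p0 :: p1 :: rest).length :=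
          (eq_prog_iff _ _ _).mp hAP
        constructor
        · intro h
          have h' : getDirectionName (p1.1 - p0.1, p1.2 - p0.2) = some nm := by
            simpa [PySem.Set.len, PySem.List.len] using h
          refine ⟨p0, (p1.1 - p0.1, p1.2 - p0.2), ⟨by simp at hlen; omega, hd0, ?_⟩, h'⟩
          rw [← hlen]
          exact hprog
        · rintro ⟨m, d, ⟨h2, hdir, hsp⟩, hname⟩
          rw [← hlen] at hsp
          have hm : m = p0 := by
            obtain ⟨k, hk⟩ : ∃ k, (p0 :: p1 :: rest).length = k + 1 := ⟨(p1 :: rest).length, by simp⟩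
            rw [hk, prog_succ] at hsp
            exact ((List.cons_eq_cons.mp hsp).1).symm
          rw [hm] at hsp
          have hAPd := (eq_prog_iff d (p1 :: rest) p0).mpr hsp
          have hd : d = (p1.1 - p0.1, p1.2 - p0.2) :=
            (hAPd (p1.1 - p0.1, p1.2 - p0.2)
              (by rw [diffs_cons_cons]; exact List.mem_cons_self)).symm
          rw [hd] at hname
          simpa [PySem.Set.len, PySem.List.len] using hname
      · -- diffs not all equal: A's set has ≥ 2 elements, and no GoodLine exists
        have hne : ((diffs (p0 :: p1 :: rest)).foldl PySem.Set.add PySem.Set.empty).length ≠ 1 := by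
          push_neg at hAP
          obtain ⟨x, hx, hxd⟩ := hAP
          intro h1
          obtain ⟨y, hy⟩ := List.length_eq_one_iff.mp h1
          have hd0 : (p1.1 - p0.1, p1.2 - p0.2) ∈
              (diffs (p0 :: p1 :: rest)).foldl PySem.Set.add PySem.Set.empty :=
            (mem_foldl_add _ _ _).mpr (Or.inr (by rw [diffs_cons_cons]; exact List.mem_cons_self))
          have hxS : x ∈ (diffs (p0 :: p1 :: rest)).foldl PySem.Set.add PySem.Set.empty :=
            (mem_foldl_add _ _ _).mpr (Or.inr hx)
          rw [hy] at hd0 hxS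
          simp only [List.mem_singleton] at hd0 hxS
          exact hxd (hxS.trans hd0.symm)
        have hfalse : (PySem.Set.len ((diffs (p0 :: p1 :: rest)).foldl PySem.Set.add PySem.Set.empty) == 1) = false := by
          have hne' : ¬ (PySem.Set.len ((diffs (p0 :: p1 :: rest)).foldl PySem.Set.add PySem.Set.empty) = 1) := by
            simp only [PySem.Set.len, PySem.List.len]
            omega
          exact beq_eq_false_iff_ne.mpr hne'
        constructor
        · intro h
          rw [hfalse] at h
          simp at h
        · rintro ⟨m, d, ⟨h2, hdir, hsp⟩, hname⟩
          exfalso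
          rw [← hlen] at hsp
          apply hAP
          have hm : m = p0 := by
            obtain ⟨k, hk⟩ : ∃ k, (p0 :: p1 :: rest).length = k + 1 := ⟨(p1 :: rest).length, by simp⟩
            rw [hk, prog_succ] at hsp
            exact ((List.cons_eq_cons.mp hsp).1).symm
          rw [hm] at hsp
          have hAPd := (eq_prog_iff d (p1 :: rest) p0).mpr hsp
          have hd : d = (p1.1 - p0.1, p1.2 - p0.2) :=
            (hAPd (p1.1 - p0.1, p1.2 - p0.2)
              (by rw [diffs_cons_cons]; exact List.mem_cons_self)).symm
          intro x hx
          rw [hAPd x hx, ← hd]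
    · rw [if_neg hall]
      constructor
      · intro h; simp at h
      · rintro ⟨m, d, ⟨h2, hdir, hsp⟩, hname⟩
        exfalso
        apply hall
        rw [← hlen] at hsp
        have hm : m = p0 := by
          obtain ⟨k, hk⟩ : ∃ k, (p0 :: p1 :: rest).length = k + 1 := ⟨(p1 :: rest).length, by simp⟩
          rw [hk, prog_succ] at hsp
          exact ((List.cons_eq_cons.mp hsp).1).symm
        rw [hm] at hsp
        have hAPd := (eq_prog_iff d (p1 :: rest) p0).mpr hsp
        rw [List.all_eq_true]
        intro x hx
        rw [hAPd x hx]
        exact hdir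

lemma B_some_iff (marbles : List (Int × Int)) (nm : String) :
    computeAlignementSort_alt marbles = some nm ↔
      ∃ m d, GoodLine marbles m d ∧ getDirectionName d = some nm := by
  rcases marbles with _ | ⟨h, t⟩
  · constructor
    · intro hB; simp [computeAlignementSort_alt] at hB
    · rintro ⟨m, d, ⟨h2, -, -⟩, -⟩; simp at h2
  by_cases hn : (((h :: t).length : Int) < 2)
  · constructor
    · intro hB
      unfold computeAlignementSort_alt at hB
      rw [if_pos hn] at hB
      cases hB
    · rintro ⟨m, d, ⟨h2, -, -⟩, -⟩
      exfalso
      have : (2 : Int) ≤ ((h :: t).length : Int) := by exact_mod_cast h2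
      omega
  -- main case: at least two marbles
  have h2 : 2 ≤ (h :: t).length := by
    push_neg at hn
    exact_mod_cast hn
  have hN : (0 : Int) < ((h :: t).length : Int) - 1 := by
    have : (2 : Int) ≤ ((h :: t).length : Int) := by exact_mod_cast h2
    omega
  obtain ⟨⟨m0, M0⟩, hmm⟩ : ∃ mM, t.foldl bUpd (h, h) = mM := ⟨_, rfl⟩
  have hm0 : m0 = t.foldl bMin h := by
    rw [← foldl_bUpd_fst t (h, h), hmm]
  have hM0 : M0 = t.foldl bMax h := by
    rw [← foldl_bUpd_snd t (h, h), hmm]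
  have hminmem : m0 ∈ h :: t := by rw [hm0]; exact (foldl_bMin_spec t h).1
  have hminle : ∀ p ∈ h :: t, m0.1 * 9 + m0.2 ≤ p.1 * 9 + p.2 := by
    rw [hm0]; exact (foldl_bMin_spec t h).2
  have hmaxmem : M0 ∈ h :: t := by rw [hM0]; exact (foldl_bMax_spec t h).1
  have hmaxge : ∀ p ∈ h :: t, p.1 * 9 + p.2 ≤ M0.1 * 9 + M0.2 := by
    rw [hM0]; exact (foldl_bMax_spec t h).2
  have hred : computeAlignementSort_alt (h :: t) = bRest (h :: t) m0 M0 := by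
    unfold computeAlignementSort_alt
    rw [if_neg hn]
    simp only [hmm]
  rw [hred]
  constructor
  · -- B succeeds → the marbles are a good line
    intro hB
    unfold bRest at hB
    split at hB
    · cases hB
    rename_i d hstep
    split at hB
    · cases hB
    rename_i nm' hfind
    by_cases hall : ((PySem.List.pyRange 0 ((h :: t).length : Int) 1).all
        (fun i => PySem.Set.contains (PySem.Set.ofList (h :: t)) (m0.1 + i * d.1, m0.2 + i * d.2))) = true
    swap
    · rw [if_neg hall] at hB
      cases hB
    rw [if_pos hall] at hB
    replace hB : nm' = nm := Option.some.inj hB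
    -- unpack bStep
    unfold bStep at hstep
    by_cases hmod : (PySem.Int.mod (M0.1 - m0.1) (((h :: t).length : Int) - 1) ≠ 0 ∨
        PySem.Int.mod (M0.2 - m0.2) (((h :: t).length : Int) - 1) ≠ 0)
    · rw [if_pos hmod] at hstep
      cases hstep
    rw [if_neg hmod] at hstep
    push_neg at hmod
    obtain ⟨hmod1, hmod2⟩ := hmod
    have hd : (PySem.Int.floordiv (M0.1 - m0.1) (((h :: t).length : Int) - 1),
               PySem.Int.floordiv (M0.2 - m0.2) (((h :: t).length : Int) - 1)) = d :=
      Option.some.inj hstep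
    have hdvd1 : (((h :: t).length : Int) - 1) ∣ (M0.1 - m0.1) :=
      (PySem.Int.mod_eq_zero_iff_dvd _ _).mp hmod1
    have hdvd2 : (((h :: t).length : Int) - 1) ∣ (M0.2 - m0.2) :=
      (PySem.Int.mod_eq_zero_iff_dvd _ _).mp hmod2
    have hdx : d.1 * (((h :: t).length : Int) - 1) = M0.1 - m0.1 := by
      rw [← hd]
      simp only []
      rw [PySem.Int.floordiv_eq_ediv_of_pos hN]
      exact Int.ediv_mul_cancel hdvd1
    have hdy : d.2 * (((h :: t).length : Int) - 1) = M0.2 - m0.2 := by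
      rw [← hd]
      simp only []
      rw [PySem.Int.floordiv_eq_ediv_of_pos hN]
      exact Int.ediv_mul_cancel hdvd2
    -- the direction found
    obtain ⟨kv, hf, hkvnm⟩ : ∃ kv, dirList.find? (fun p => p.2 == d) = some kv ∧ kv.1 = nm' := by
      rcases hf : dirList.find? (fun p => p.2 == d) with _ | kv
      · rw [hf] at hfind; cases hfind
      · rw [hf] at hfind
        exact ⟨kv, hf, Option.some.inj hfind⟩
    have hkvmem : kv ∈ dirList := List.mem_of_find?_eq_some hf
    have hkvd : kv.2 = d := by simpa using List.find?_some hf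
    have hdir : dirList.any (fun p => p.2 == d) = true :=
      List.any_eq_true.mpr ⟨kv, hkvmem, by simp [hkvd]⟩
    -- the step's key is positive
    have hsum : (d.1 * 9 + d.2) * (((h :: t).length : Int) - 1)
        = (M0.1 * 9 + M0.2) - (m0.1 * 9 + m0.2) := by linear_combination 9 * hdx + hdy
    have hminM : m0.1 * 9 + m0.2 ≤ M0.1 * 9 + M0.2 := hminle M0 hmaxmem
    have hkpos : 0 < d.1 * 9 + d.2 := by
      have hkne : d.1 * 9 + d.2 ≠ 0 := by
        have hx := dir_key_ne kv hkvmem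
        rw [hkvd] at hx
        exact hx
      rcases lt_trichotomy (d.1 * 9 + d.2) 0 with hlt | heq | hgt
      · exfalso
        have : (d.1 * 9 + d.2) * (((h :: t).length : Int) - 1) < 0 :=
          mul_neg_of_neg_of_pos hlt hN
        linarith
      · exact absurd heq hkne
      · exact hgt
    -- every progression point is a marble
    have hsub : ∀ x ∈ prog m0 d (h :: t).length, x ∈ h :: t := by
      intro x hx
      rw [mem_prog] at hx
      obtain ⟨i, hi, rfl⟩ := hx
      have hmem := List.all_eq_true.mp hall (i : Int)
        (PySem.List.mem_pyRange_one.mpr ⟨Int.natCast_nonneg i, by exact_mod_cast hi⟩)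
      simp only [] at hmem
      exact (PySem.Set.mem_ofList _ _).mp ((PySem.Set.contains_iff _ _).mp hmem)
    have hnd := prog_nodup m0 d (h :: t).length hkpos
    have hlenp : (prog m0 d (h :: t).length).length = (h :: t).length := length_prog _ _ _
    have hperm : (prog m0 d (h :: t).length).Perm (h :: t) :=
      (hnd.subperm hsub).perm_of_length_le (by omega)
    have hsorted := PySem.List.sorted_eq_of_perm_of_pairwise_lt (h :: t)
      (prog m0 d (h :: t).length) (fun L => L.1 * 9 + L.2) hperm
      (prog_pairwise m0 d (h :: t).length hkpos)
    refine ⟨m0, d, ⟨h2, hdir, hsorted⟩, ?_⟩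
    unfold getDirectionName
    rw [hf]
    simp [hkvnm, hB]
  · -- a good line → B succeeds
    rintro ⟨m, d, ⟨h2', hdir, hsp⟩, hname⟩
    have hkpos : 0 < d.1 * 9 + d.2 := good_key_pos _ m d ⟨h2', hdir, hsp⟩
    have hperm : (h :: t).Perm (prog m d (h :: t).length) := by
      have hp := PySem.List.sorted_perm (h :: t) (fun L => L.1 * 9 + L.2) false
      rw [hsp] at hp
      exact hp.symm
    have hm_mem : m ∈ h :: t := by
      apply hperm.mem_iff.mpr
      rw [mem_prog]
      exact ⟨0, by omega, by refine Prod.ext_iff.mpr ⟨?_, ?_⟩ <;> simp⟩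
    have hstrict_min : ∀ p ∈ h :: t, p ≠ m → m.1 * 9 + m.2 < p.1 * 9 + p.2 := by
      intro p hp hpne
      obtain ⟨i, hi, rfl⟩ := (mem_prog m d _ _).mp (hperm.mem_iff.mp hp)
      rcases Nat.eq_zero_or_pos i with h0 | h0
      · exfalso
        apply hpne
        subst h0
        refine Prod.ext_iff.mpr ⟨?_, ?_⟩ <;> simp
      · have h1i : (1 : Int) ≤ (i : Int) := by exact_mod_cast h0
        dsimp only
        nlinarith [mul_le_mul_of_nonneg_right h1i (le_of_lt hkpos)]
    have hcast : (((h :: t).length - 1 : Nat) : Int) = ((h :: t).length : Int) - 1 := by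
      have h1le : 1 ≤ (h :: t).length := by omega
      rw [Nat.cast_sub h1le]
      norm_num
    have he_mem_prog : ((m.1 + (((h :: t).length : Int) - 1) * d.1,
        m.2 + (((h :: t).length : Int) - 1) * d.2) : Int × Int) ∈ prog m d (h :: t).length := by
      rw [mem_prog]
      refine ⟨(h :: t).length - 1, by omega, ?_⟩
      rw [hcast]
    have he_mem : ((m.1 + (((h :: t).length : Int) - 1) * d.1,
        m.2 + (((h :: t).length : Int) - 1) * d.2) : Int × Int) ∈ h :: t :=
      hperm.mem_iff.mpr he_mem_prog
    have hstrict_max : ∀ p ∈ h :: t,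
        p ≠ ((m.1 + (((h :: t).length : Int) - 1) * d.1,
             m.2 + (((h :: t).length : Int) - 1) * d.2) : Int × Int) →
        p.1 * 9 + p.2 < (m.1 + (((h :: t).length : Int) - 1) * d.1) * 9
          + (m.2 + (((h :: t).length : Int) - 1) * d.2) := by
      intro p hp hpne
      obtain ⟨i, hi, rfl⟩ := (mem_prog m d _ _).mp (hperm.mem_iff.mp hp)
      have hine : (i : Int) ≠ ((h :: t).length : Int) - 1 := by
        intro hc
        apply hpne
        rw [hc]
      have hilt : (i : Int) < ((h :: t).length : Int) - 1 := by
        have : (i : Int) < ((h :: t).length : Int) := by exact_mod_cast hi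
        omega
      dsimp only
      nlinarith [mul_pos (sub_pos.mpr hilt) hkpos]
    have hm0m : m0 = m := by
      by_contra hne
      have ha := hstrict_min m0 hminmem hne
      have hb := hminle m hm_mem
      omega
    have hM0e : M0 = ((m.1 + (((h :: t).length : Int) - 1) * d.1,
        m.2 + (((h :: t).length : Int) - 1) * d.2) : Int × Int) := by
      by_contra hne
      have ha := hstrict_max M0 hmaxmem hne
      have hb := hmaxge _ he_mem
      omega
    rw [hm0m, hM0e]
    have hstep : bStep m
        ((m.1 + (((h :: t).length : Int) - 1) * d.1,
          m.2 + (((h :: t).length : Int) - 1) * d.2) : Int × Int)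
        (((h :: t).length : Int) - 1) = some d := by
      unfold bStep
      have hdx : ((m.1 + (((h :: t).length : Int) - 1) * d.1, m.2 + (((h :: t).length : Int) - 1) * d.2) : Int × Int).1 - m.1
          = (((h :: t).length : Int) - 1) * d.1 := by dsimp only; ring
      have hdy : ((m.1 + (((h :: t).length : Int) - 1) * d.1, m.2 + (((h :: t).length : Int) - 1) * d.2) : Int × Int).2 - m.2
          = (((h :: t).length : Int) - 1) * d.2 := by dsimp only; ring
      rw [hdx, hdy]
      have hm1 : PySem.Int.mod ((((h :: t).length : Int) - 1) * d.1) (((h :: t).length : Int) - 1) = 0 :=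
        (PySem.Int.mod_eq_zero_iff_dvd _ _).mpr ⟨d.1, rfl⟩
      have hm2 : PySem.Int.mod ((((h :: t).length : Int) - 1) * d.2) (((h :: t).length : Int) - 1) = 0 :=
        (PySem.Int.mod_eq_zero_iff_dvd _ _).mpr ⟨d.2, rfl⟩
      rw [if_neg (not_or.mpr ⟨fun hc => hc hm1, fun hc => hc hm2⟩)]
      refine congrArg some (Prod.ext_iff.mpr ⟨?_, ?_⟩)
      · show PySem.Int.floordiv ((((h :: t).length : Int) - 1) * d.1) (((h :: t).length : Int) - 1) = d.1
        rw [PySem.Int.floordiv_eq_ediv_of_pos hN]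
        exact Int.mul_ediv_cancel_left _ (ne_of_gt hN)
      · show PySem.Int.floordiv ((((h :: t).length : Int) - 1) * d.2) (((h :: t).length : Int) - 1) = d.2
        rw [PySem.Int.floordiv_eq_ediv_of_pos hN]
        exact Int.mul_ediv_cancel_left _ (ne_of_gt hN)
    have hall : ((PySem.List.pyRange 0 ((h :: t).length : Int) 1).all
        (fun i => PySem.Set.contains (PySem.Set.ofList (h :: t)) (m.1 + i * d.1, m.2 + i * d.2))) = true := by
      rw [List.all_eq_true]
      intro i hi
      rw [PySem.List.mem_pyRange_one] at hi
      obtain ⟨hi0, hilt⟩ := hi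
      have hx : ((m.1 + i * d.1, m.2 + i * d.2) : Int × Int) ∈ h :: t := by
        apply hperm.mem_iff.mpr
        rw [mem_prog]
        refine ⟨i.toNat, ?_, ?_⟩
        · omega
        · rw [Int.toNat_of_nonneg hi0]
      exact (PySem.Set.contains_iff _ _).mpr ((PySem.Set.mem_ofList _ _).mpr hx)
    unfold bRest
    simp only [hstep]
    unfold getDirectionName at hname
    rw [hname, hall]
    simp

-- ===== VERDICT (by name: the statement is the Claim_ definition above) =====
theorem computeAlignementSort_spec : Claim_equal_computeAlignementSort := by
  intro marbles _
  unfold Spec_computeAlignementSort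
  cases hB : computeAlignementSort_alt marbles with
  | some nm =>
    exact (A_some_iff marbles nm).mpr ((B_some_iff marbles nm).mp hB)
  | none =>
    cases hA : computeAlignementSort marbles with
    | none => rfl
    | some nm =>
      rw [(B_some_iff marbles nm).mpr ((A_some_iff marbles nm).mp hA)] at hB
      cases hB
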